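-- pv_equiv track=rewrite | github.com/like-eat/conversation-analysis | py/Methods.py | pack_msgs
-- ===== SOURCE A (Python) =====
-- from typing import Any, Dict, List
--
-- def pack_msgs(msgs: List[Dict[str, Any]], max_chars: int = 3000) -> str:
--     lines = []
--     total = 0
--     for m in msgs:
--         try:
--             mid = int(m.get("id", 0))
--         except:
--             continue
--         role = (m.get("role") or m.get("from") or m.get("source") or "unknown").strip()
--         text = (m.get("content") or m.get("text") or "").replace("\n", " ").strip()
--         if not text:
--             continue
--         line = f"[{mid}][{role}]: {text}"
--         if total + len(line) > max_chars:
--             break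
--         lines.append(line)
--         total += len(line)
--     return "\n".join(lines)
-- ===== SOURCE B (Python) =====
-- # B: two-pass decomposition — first format/filter all lines, then select the
-- # budget-bounded prefix (stop at first overflow) and join.
-- def _fmt(m):
--     text = (m.get("content") or m.get("text") or "").replace("\n", " ").strip()
--     if not text:
--         return None
--     try:
--         mid = int(m.get("id", 0))
--     except Exception:
--         return None
--     role = (m.get("role") or m.get("from") or m.get("source") or "unknown").strip()
--     return f"[{mid}][{role}]: {text}"
--
-- def _cut(lines, max_chars):
--     cum = 0
--     for i, l in enumerate(lines):
--         cum += len(l)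
--         if cum > max_chars:
--             return i
--     return len(lines)
--
-- def pack_msgs(msgs, max_chars=3000):
--     lines = [f for f in (_fmt(m) for m in msgs) if f is not None]
--     return "\n".join(lines[:_cut(lines, max_chars)])
-- ===== Notes on version B (the rewrite author's own statement) =====
-- stated objective: alternative
-- what changed: B splits A's single interleaved loop into two phases: a formatting/filtering pass producing all candidate lines, then a separate cumulative-length cutoff that picks the longest non-overflowing prefix, joined at the end.
import Mathlib
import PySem

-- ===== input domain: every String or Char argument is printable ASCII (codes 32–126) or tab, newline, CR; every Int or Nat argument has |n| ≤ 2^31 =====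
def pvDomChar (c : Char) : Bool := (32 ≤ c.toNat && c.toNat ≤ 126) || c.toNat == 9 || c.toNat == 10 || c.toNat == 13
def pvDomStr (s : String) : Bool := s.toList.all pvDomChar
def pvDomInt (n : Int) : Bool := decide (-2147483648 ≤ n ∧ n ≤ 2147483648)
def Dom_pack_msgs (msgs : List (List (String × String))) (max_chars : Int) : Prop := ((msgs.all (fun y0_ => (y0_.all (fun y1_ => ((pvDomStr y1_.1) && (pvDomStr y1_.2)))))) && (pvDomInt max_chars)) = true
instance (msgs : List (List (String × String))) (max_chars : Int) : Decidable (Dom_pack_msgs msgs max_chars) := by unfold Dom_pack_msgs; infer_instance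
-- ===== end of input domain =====

-- B replaces A's single interleaved loop by two phases (format/filter all lines, then a
-- cumulative-length prefix cutoff); objective: alternative decomposition, same cost.

-- Python's `x or y` on strings/None: first truthy value ("" and None are falsy)
def pyOrS (a b : String) : String := if a = "" then b else a

-- int(m.get("id", 0)): some mid on success, none where Python's int() raises (→ continue)
def pyMid? (m : List (String × String)) : Option Int :=
  match (PySem.Dict.mk m).get? "id" with
  | none => some (0 : Int)
  | some s => PySem.Int.ofStr? s

-- (m.get("role") or m.get("from") or m.get("source") or "unknown").strip()
def pyRole (m : List (String × String)) : String :=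
  PySem.Str.strip (pyOrS (pyOrS (pyOrS (((PySem.Dict.mk m).get? "role").getD "")
    (((PySem.Dict.mk m).get? "from").getD "")) (((PySem.Dict.mk m).get? "source").getD "")) "unknown")

-- (m.get("content") or m.get("text") or "").replace("\n", " ").strip()
def pyText (m : List (String × String)) : String :=
  PySem.Str.strip (PySem.Str.replace
    (pyOrS (((PySem.Dict.mk m).get? "content").getD "") (((PySem.Dict.mk m).get? "text").getD ""))
    "\n" " ")

-- ===== PORT A =====
-- A's single loop: state (lines, total), `continue` = recurse unchanged, `break` = return lines
def pack_msgs_loop (max_chars : Int) (msgs : List (List (String × String)))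
    (lines : List String) (total : Int) : List String :=
  match msgs with
  | [] => lines
  | m :: rest =>
    match pyMid? m with
    | none => pack_msgs_loop max_chars rest lines total
    | some mid =>
      let role := pyRole m
      let text := pyText m
      if text = "" then pack_msgs_loop max_chars rest lines total
      else
        let line := "[" ++ PySem.Int.toStr mid ++ "][" ++ role ++ "]: " ++ text
        if total + PySem.Str.len line > max_chars then lines
        else pack_msgs_loop max_chars rest (lines ++ [line]) (total + PySem.Str.len line)

def pack_msgs (msgs : List (List (String × String))) (max_chars : Int) : String :=
  PySem.Str.join "\n" (pack_msgs_loop max_chars msgs [] 0)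

-- ===== PORT B =====
-- _fmt(m): the formatted line, or none for a skipped message (B checks text first)
def fmtLine (m : List (String × String)) : Option String :=
  let text := pyText m
  if text = "" then none
  else
    match pyMid? m with
    | none => none
    | some mid =>
      let role := pyRole m
      some ("[" ++ PySem.Int.toStr mid ++ "][" ++ role ++ "]: " ++ text)

-- _cut(lines, max_chars): index of the first line whose cumulative length overflows
def cutIdx (max_chars : Int) : List String → Int → Nat
  | [], _ => 0
  | l :: rest, cum =>
    if cum + PySem.Str.len l > max_chars then 0
    else cutIdx max_chars rest (cum + PySem.Str.len l) + 1

def pack_msgs_alt (msgs : List (List (String × String))) (max_chars : Int) : String :=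
  let lines := msgs.filterMap fmtLine
  PySem.Str.join "\n" (lines.take (cutIdx max_chars lines 0))

-- ===== PRECONDITION & SPEC =====
def Spec_pack_msgs (msgs : List (List (String × String))) (max_chars : Int) (out : String) : Prop := out = pack_msgs_alt msgs max_chars
instance (msgs : List (List (String × String))) (max_chars : Int) (out : String) : Decidable (Spec_pack_msgs msgs max_chars out) := by unfold Spec_pack_msgs; infer_instance

-- ===== CLAIM (what is proved, stated in full; the proofs are below) =====
def Claim_equal_pack_msgs : Prop := ∀ (msgs : List (List (String × String))) (max_chars : Int), Dom_pack_msgs msgs max_chars → Spec_pack_msgs msgs max_chars (pack_msgs msgs max_chars)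

-- ===== LEMMAS AND PROOFS =====
lemma pack_msgs_loop_eq (max_chars : Int) (msgs : List (List (String × String))) :
    ∀ (acc : List String) (total : Int),
      pack_msgs_loop max_chars msgs acc total =
        acc ++ (msgs.filterMap fmtLine).take (cutIdx max_chars (msgs.filterMap fmtLine) total) := by
  induction msgs with
  | nil => intro acc total; simp [pack_msgs_loop, cutIdx]
  | cons m rest ih =>
    intro acc total
    by_cases ht : pyText m = ""
    · have hfm : fmtLine m = none := by
        simp only [fmtLine]; rw [if_pos ht]
      cases hm : pyMid? m
      · simp only [pack_msgs_loop, hm, List.filterMap_cons, hfm]; exact ih acc total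
      · simp only [pack_msgs_loop, hm, List.filterMap_cons, hfm, if_pos ht]; exact ih acc total
    · cases hm : pyMid? m
      · have hfm : fmtLine m = none := by
          simp only [fmtLine]; rw [if_neg ht, hm]
        simp only [pack_msgs_loop, hm, List.filterMap_cons, hfm]; exact ih acc total
      · rename_i mid
        have hfm : fmtLine m =
            some ("[" ++ PySem.Int.toStr mid ++ "][" ++ pyRole m ++ "]: " ++ pyText m) := by
          simp only [fmtLine]; rw [if_neg ht, hm]
        simp only [pack_msgs_loop, hm, List.filterMap_cons, hfm, if_neg ht]
        by_cases hov : total +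
            PySem.Str.len ("[" ++ PySem.Int.toStr mid ++ "][" ++ pyRole m ++ "]: " ++ pyText m) >
            max_chars
        · simp only [cutIdx, if_pos hov, List.take_zero, List.append_nil]
        · simp only [cutIdx, if_neg hov, List.take_succ_cons]
          rw [ih]
          simp only [List.append_assoc, List.singleton_append]

theorem pack_msgs_spec : Claim_equal_pack_msgs := by
  intro msgs max_chars _
  unfold Spec_pack_msgs pack_msgs pack_msgs_alt
  rw [pack_msgs_loop_eq]
  simp
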